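-- pv_equiv track=rewrite | github.com/jeff-pow/python-course | lab4/lab4.py | places_to_skip
-- ===== SOURCE A (Python) =====
-- def places_to_skip(student_list):
--     l1 = student_list.copy()
--     l1.sort()
--     invalid = 0
--     for idx in range(len(l1)):
--         if l1[idx][0] != -1:
--             return invalid
--         invalid += 1
--     return invalid
-- ===== SOURCE B (Python) =====
-- def places_to_skip(student_list):
--     # The entries flagged -1 occupy the leading block of the sorted order
--     # exactly when -1 is the smallest first component: count them in one
--     # pass instead of sorting.
--     firsts = [s[0] for s in student_list]
--     if not firsts or min(firsts) != -1:
--         return 0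
--     return firsts.count(-1)
-- ===== Notes on version B (the rewrite author's own statement) =====
-- stated objective: alternative
-- what changed: Replaces copy+sort+prefix-scan with one unsorted pass: the -1-flagged entries lead the sorted order exactly when -1 is the minimal first component, so B returns their count when min(firsts) == -1 and 0 otherwise; Pre_ excludes only lists containing an empty sublist, on which A raises IndexError (and B raises too).
import Mathlib
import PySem

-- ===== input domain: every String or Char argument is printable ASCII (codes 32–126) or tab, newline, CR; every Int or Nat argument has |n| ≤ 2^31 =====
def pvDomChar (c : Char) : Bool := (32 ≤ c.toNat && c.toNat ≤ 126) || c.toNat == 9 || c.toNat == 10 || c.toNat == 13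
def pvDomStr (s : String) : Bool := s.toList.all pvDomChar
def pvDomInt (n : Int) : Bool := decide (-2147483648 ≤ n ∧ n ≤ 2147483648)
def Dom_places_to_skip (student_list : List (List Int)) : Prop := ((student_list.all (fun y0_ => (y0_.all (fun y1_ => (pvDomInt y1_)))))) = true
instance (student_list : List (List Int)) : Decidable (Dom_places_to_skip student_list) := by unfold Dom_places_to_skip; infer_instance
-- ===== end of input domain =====

-- B replaces A's copy+sort+prefix-scan with a single unsorted pass (min + count of -1 firsts).


-- ===== PORT A =====
-- the for-loop over range(len(l1)), reading l1[idx][0] (default 0 is never hit under Pre_)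
def pvLoopA : List (List Int) → Int → Int
  | [], invalid => invalid
  | x :: xs, invalid =>
      if PySem.List.pyGetD x 0 0 ≠ -1 then invalid
      else pvLoopA xs (invalid + 1)

-- l1.sort(): Python's lexicographic list sort (the Mathlib lex order on List Int)
def pvSorted (l : List (List Int)) : List (List Int) :=
  @PySem.List.sorted (List Int) (List Int) List.instLinearOrder.toLT LinearOrder.toDecidableLT l (fun x => x) false

def places_to_skip (student_list : List (List Int)) : Int :=
  pvLoopA (pvSorted student_list) 0

-- ===== PORT B =====
-- firsts = [s[0] for s in student_list]; 0 unless min(firsts) == -1, else firsts.count(-1)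
-- (pyGetD default 0 is never hit under Pre_)
def places_to_skip_alt (student_list : List (List Int)) : Int :=
  let firsts := student_list.map (fun s => PySem.List.pyGetD s 0 0)
  if firsts = [] ∨ ¬ (PySem.List.min? firsts (fun x => x) = some (-1)) then 0
  else (firsts.count (-1) : Int)

-- ===== PRECONDITION & SPEC =====
-- Pre_ excludes only inputs containing an empty sublist: there A raises IndexError
-- (the empty list sorts first and l1[0][0] fails); B's s[0] raises there too.
def Pre_places_to_skip (student_list : List (List Int)) : Prop :=
  ∀ l ∈ student_list, l ≠ []

instance (student_list : List (List Int)) : Decidable (Pre_places_to_skip student_list) := by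
  unfold Pre_places_to_skip; infer_instance

def pvWitness_places_to_skip : List (List Int) := [[-1, 4], [2], [-1, 0]]

def Spec_places_to_skip (student_list : List (List Int)) (out : Int) : Prop :=
  out = places_to_skip_alt student_list
instance (student_list : List (List Int)) (out : Int) : Decidable (Spec_places_to_skip student_list out) := by unfold Spec_places_to_skip; infer_instance

-- ===== CLAIM (what is proved, stated in full; the proofs are below) =====
def Claim_equal_places_to_skip : Prop := ∀ (student_list : List (List Int)), Dom_places_to_skip student_list → Pre_places_to_skip student_list → Spec_places_to_skip student_list (places_to_skip student_list)

-- ===== LEMMAS AND PROOFS =====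

-- A's loop counts the length of the prefix of first-components equal to -1
lemma pvLoopA_eq (l : List (List Int)) (inv : Int) :
    pvLoopA l inv =
      inv + ((l.takeWhile (fun x => decide (PySem.List.pyGetD x 0 0 = -1))).length : Int) := by
  induction l generalizing inv with
  | nil => simp [pvLoopA]
  | cons x xs ih =>
      by_cases h : PySem.List.pyGetD x 0 0 = -1
      · simp [pvLoopA, h, ih]
        ring
      · simp [pvLoopA, h]

-- lexicographic order on nonempty lists compares heads first
lemma head_le_of_le {a b : Int} {as bs : List Int} (h : (a :: as) ≤ (b :: bs)) : a ≤ b := by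
  rcases lt_or_eq_of_le h with hlt | heq
  · exact List.head_le_of_lt hlt
  · cases heq; exact le_rfl

lemma pyHead_le_of_le {x y : List Int} (hx : x ≠ []) (hy : y ≠ []) (h : x ≤ y) :
    PySem.List.pyGetD x 0 0 ≤ PySem.List.pyGetD y 0 0 := by
  cases x with
  | nil => exact absurd rfl hx
  | cons a as =>
    cases y with
    | nil => exact absurd rfl hy
    | cons b bs =>
        simpa [PySem.List.pyGetD_zero_cons] using head_le_of_le h

-- on a lex-sorted list of nonempty lists, the -1-first prefix length is
-- 0 if some first component is below -1, else the total count of -1 firsts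
lemma sorted_prefix_eq (l : List (List Int))
    (hp : l.Pairwise (· ≤ ·)) (hne : ∀ x ∈ l, x ≠ []) :
    ((l.takeWhile (fun x => decide (PySem.List.pyGetD x 0 0 = -1))).length : Int) =
      if l.any (fun x => decide (PySem.List.pyGetD x 0 0 < -1)) then 0
      else ((l.countP (fun x => decide (PySem.List.pyGetD x 0 0 = -1))) : Int) := by
  induction l with
  | nil => simp
  | cons x xs ih =>
      have hxne : x ≠ [] := hne x (by simp)
      have hxs : ∀ y ∈ xs, x ≤ y := fun y hy => (List.pairwise_cons.mp hp).1 y hy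
      have hpxs : xs.Pairwise (· ≤ ·) := (List.pairwise_cons.mp hp).2
      have hnexs : ∀ y ∈ xs, y ≠ [] := fun y hy => hne y (by simp [hy])
      have ihx := ih hpxs hnexs
      rcases lt_trichotomy (PySem.List.pyGetD x 0 0) (-1) with hlt | heq | hgt
      · -- first element's head is already below -1: prefix empty, any true
        have hne1 : ¬ (PySem.List.pyGetD x 0 0 = -1) := by omega
        simp [hne1, List.any_cons, hlt]
      · -- head is -1: no head can be below -1 (heads are ≥ this head)
        have hnone : ∀ y ∈ xs, ¬ (PySem.List.pyGetD y 0 0 < -1) := by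
          intro y hy
          have := pyHead_le_of_le hxne (hnexs y hy) (hxs y hy)
          omega
        have hanyxs : xs.any (fun x => decide (PySem.List.pyGetD x 0 0 < -1)) = false := by
          simp only [List.any_eq_false, decide_eq_true_eq]
          exact hnone
        simp [heq, List.any_cons, hanyxs, ihx]
      · -- head is above -1: every head is, so no -1 firsts at all
        have hne1 : ¬ (PySem.List.pyGetD x 0 0 = -1) := by omega
        have hnlt : ¬ (PySem.List.pyGetD x 0 0 < -1) := by omega
        have hnone : ∀ y ∈ xs, ¬ (PySem.List.pyGetD y 0 0 = -1) ∧ ¬ (PySem.List.pyGetD y 0 0 < -1) := by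
          intro y hy
          have := pyHead_le_of_le hxne (hnexs y hy) (hxs y hy)
          constructor <;> omega
        have hanyxs : xs.any (fun x => decide (PySem.List.pyGetD x 0 0 < -1)) = false := by
          simp only [List.any_eq_false, decide_eq_true_eq]
          exact fun y hy => (hnone y hy).2
        have hcnt : xs.countP (fun x => decide (PySem.List.pyGetD x 0 0 = -1)) = 0 := by
          simp only [List.countP_eq_zero, decide_eq_true_eq]
          exact fun y hy => (hnone y hy).1
        simp [hne1, List.any_cons, hnlt, hanyxs, hcnt]

-- any/countP are invariant under the sorting permutation
lemma pvSorted_perm (l : List (List Int)) : (pvSorted l).Perm l :=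
  @PySem.List.sorted_perm (List Int) (List Int) List.instLinearOrder.toLT
    LinearOrder.toDecidableLT l (fun x => x) false

lemma any_sorted_eq (l : List (List Int)) (p : List Int → Bool) :
    (pvSorted l).any p = l.any p := by
  have h := pvSorted_perm l
  cases hb : l.any p
  · simp only [List.any_eq_false] at hb ⊢
    exact fun x hx => hb x (h.mem_iff.mp hx)
  · simp only [List.any_eq_true] at hb ⊢
    obtain ⟨x, hx, hpx⟩ := hb
    exact ⟨x, h.mem_iff.mpr hx, hpx⟩

-- the min/count formulation over firsts agrees with the any/countP one over l
lemma alt_eq_anycount (l : List (List Int)) :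
    places_to_skip_alt l =
      if l.any (fun x => decide (PySem.List.pyGetD x 0 0 < -1)) then 0
      else ((l.countP (fun x => decide (PySem.List.pyGetD x 0 0 = -1))) : Int) := by
  unfold places_to_skip_alt
  cases l with
  | nil => simp
  | cons x xs =>
      have hfne : (x :: xs).map (fun s => PySem.List.pyGetD s 0 0) ≠ [] := by simp
      obtain ⟨m, hm⟩ :
          ∃ m, PySem.List.min? ((x :: xs).map (fun s => PySem.List.pyGetD s 0 0)) (fun v => v) = some m := by
        cases hc : PySem.List.min? ((x :: xs).map (fun s => PySem.List.pyGetD s 0 0)) (fun v => v) with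
        | none =>
            exact absurd ((PySem.List.min?_eq_none_iff _ _).mp hc) hfne
        | some m => exact ⟨m, rfl⟩
      have hmem : m ∈ (x :: xs).map (fun s => PySem.List.pyGetD s 0 0) := PySem.List.min?_mem hm
      have hmin : ∀ y ∈ (x :: xs).map (fun s => PySem.List.pyGetD s 0 0), m ≤ y :=
        PySem.List.min?_isMin hm
      have hany :
          (x :: xs).any (fun s => decide (PySem.List.pyGetD s 0 0 < -1)) =
            ((x :: xs).map (fun s => PySem.List.pyGetD s 0 0)).any (fun v => decide (v < -1)) := by
        simp [List.any_map, Function.comp_def]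
      have hcnt :
          ((x :: xs).countP (fun s => decide (PySem.List.pyGetD s 0 0 = -1)) : Int) =
            (((x :: xs).map (fun s => PySem.List.pyGetD s 0 0)).count (-1) : Int) := by
        simp only [List.count, List.countP_map]
        congr 1
      rcases lt_trichotomy m (-1) with hlt | heq | hgt
      · -- the minimal first is below -1: both sides are 0
        have hanyT : (x :: xs).any (fun s => decide (PySem.List.pyGetD s 0 0 < -1)) = true := by
          rw [hany]
          simp only [List.any_eq_true, decide_eq_true_eq]
          exact ⟨m, hmem, hlt⟩
        rw [if_pos (Or.inr (by rw [hm]; intro h; injection h with h; omega)), if_pos hanyT]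
      · -- the minimal first is -1: no first below -1, and A's countP is B's count
        have hanyF : (x :: xs).any (fun s => decide (PySem.List.pyGetD s 0 0 < -1)) = false := by
          rw [hany]
          simp only [List.any_eq_false, decide_eq_true_eq]
          intro y hy; have := hmin y hy; omega
        rw [if_neg (by push Not; exact ⟨hfne, by rw [hm, heq]⟩),
            if_neg (by simp [hanyF]), hcnt]
      · -- the minimal first is above -1: no -1 firsts at all, both sides 0
        have hanyF : (x :: xs).any (fun s => decide (PySem.List.pyGetD s 0 0 < -1)) = false := by
          rw [hany]
          simp only [List.any_eq_false, decide_eq_true_eq]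
          intro y hy; have := hmin y hy; omega
        have hc0 : (x :: xs).countP (fun s => decide (PySem.List.pyGetD s 0 0 = -1)) = 0 := by
          simp only [List.countP_eq_zero, decide_eq_true_eq]
          intro s hs h1
          have : m ≤ -1 := by
            have := hmin (-1) (by simp only [List.mem_map]; exact ⟨s, hs, h1⟩)
            exact this
          omega
        rw [if_pos (Or.inr (by rw [hm]; intro h; injection h with h; omega)),
            if_neg (by simp [hanyF]), hc0]
        simp

-- ===== VERDICT (by name: the statement is the Claim_ definition above) =====
theorem places_to_skip_spec : Claim_equal_places_to_skip := by
  intro sl _hdom hpre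
  unfold Spec_places_to_skip places_to_skip
  have hperm := pvSorted_perm sl
  have hpair : (pvSorted sl).Pairwise (· ≤ ·) := by
    simpa [pvSorted] using PySem.List.sorted_pairwise sl (fun x : List Int => x)
  have hne : ∀ x ∈ pvSorted sl, x ≠ [] := by
    intro x hx
    exact hpre x (hperm.mem_iff.mp hx)
  rw [pvLoopA_eq, sorted_prefix_eq _ hpair hne, any_sorted_eq sl, hperm.countP_eq,
      alt_eq_anycount]
  simp
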